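-- pv_equiv track=rewrite | github.com/RHUDHRESH/Raptorflow | backend/workflows/campaign.py | _group_moves_for_execution
-- ===== SOURCE A (Python) =====
-- from typing import Any, Dict, List, Optional
--
-- def _group_moves_for_execution(
--     campaign_moves: List[Dict[str, Any]]
-- ) -> List[List[Dict[str, Any]]]:
--     """Group moves for execution."""
--     # Simple grouping by priority
--     high_priority = [m for m in campaign_moves if m.get("priority", 5) <= 2]
--     medium_priority = [m for m in campaign_moves if 2 < m.get("priority", 5) <= 4]
--     low_priority = [m for m in campaign_moves if m.get("priority", 5) > 4]
--
--     groups = []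
--     if high_priority:
--         groups.append(high_priority)
--     if medium_priority:
--         groups.append(medium_priority)
--     if low_priority:
--         groups.append(low_priority)
--
--     return groups
-- ===== SOURCE B (Python) =====
-- def _group_moves_for_execution(campaign_moves):
--     """Group moves for execution (stable sort by bucket key, then group runs)."""
--     def bucket(m):
--         p = m.get("priority", 5)
--         if p <= 2:
--             return 0
--         if p <= 4:
--             return 1
--         return 2
--
--     groups = []
--     last = None
--     for m in sorted(campaign_moves, key=bucket):
--         b = bucket(m)
--         if b == last:
--             groups[-1].append(m)
--         else:
--             groups.append([m])
--             last = b
--     return groups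
-- ===== Notes on version B (the rewrite author's own statement) =====
-- stated objective: alternative
-- what changed: Instead of three filtering scans, B stable-sorts the moves by a 0/1/2 bucket key and then groups consecutive runs of equal key in one pass; stability preserves insertion order within each priority band and empty bands simply never appear as runs.
import Mathlib
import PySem

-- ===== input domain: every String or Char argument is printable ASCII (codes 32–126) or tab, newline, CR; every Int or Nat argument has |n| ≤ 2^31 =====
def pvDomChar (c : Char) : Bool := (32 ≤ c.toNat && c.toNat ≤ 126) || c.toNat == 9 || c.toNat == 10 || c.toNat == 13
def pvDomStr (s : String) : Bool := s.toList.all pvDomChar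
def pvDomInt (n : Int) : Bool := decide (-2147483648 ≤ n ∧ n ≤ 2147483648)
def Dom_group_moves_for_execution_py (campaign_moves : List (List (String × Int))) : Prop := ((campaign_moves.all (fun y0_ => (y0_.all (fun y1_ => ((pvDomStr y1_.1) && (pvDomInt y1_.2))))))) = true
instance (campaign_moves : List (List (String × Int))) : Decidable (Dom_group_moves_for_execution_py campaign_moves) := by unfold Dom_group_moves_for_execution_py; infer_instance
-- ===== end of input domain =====

-- B replaces A's three filtering scans by a stable sort on a 0/1/2 bucket key followed by
-- grouping consecutive runs of equal key (alternative algorithm, same observable result).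

-- ===== PORT A =====
-- m.get("priority", 5): first-match lookup in the association list, default 5 (exact Python dict.get)
def pvPriority (m : List (String × Int)) : Int := PySem.Dict.getD (PySem.Dict.mk m) "priority" 5

def group_moves_for_execution_py (campaign_moves : List (List (String × Int))) : List (List (List (String × Int))) :=
  let high_priority := campaign_moves.filter (fun m => decide (pvPriority m ≤ 2))
  let medium_priority := campaign_moves.filter (fun m => decide (2 < pvPriority m ∧ pvPriority m ≤ 4))
  let low_priority := campaign_moves.filter (fun m => decide (4 < pvPriority m))
  (if high_priority.isEmpty then [] else [high_priority]) ++
  (if medium_priority.isEmpty then [] else [medium_priority]) ++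
  (if low_priority.isEmpty then [] else [low_priority])

-- ===== PORT B =====
-- bucket(m): 0 for priority ≤ 2, 1 for ≤ 4, else 2 (Source B's inner helper)
def pvBucket (m : List (String × Int)) : Int :=
  if pvPriority m ≤ 2 then 0 else if pvPriority m ≤ 4 then 1 else 2

-- groups[-1].append(m): append m to the last group
def pvAppendLast (gs : List (List (List (String × Int)))) (m : List (String × Int)) :
    List (List (List (String × Int))) :=
  match gs with
  | [] => [[m]]
  | [g] => [g ++ [m]]
  | g :: rest => g :: pvAppendLast rest m

-- one iteration of Source B's loop; state = (groups, last)
def pvGroupStep (acc : List (List (List (String × Int))) × Option Int) (m : List (String × Int)) :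
    List (List (List (String × Int))) × Option Int :=
  let b := pvBucket m
  if acc.2 = some b then (pvAppendLast acc.1 m, acc.2)
  else (acc.1 ++ [[m]], some b)

def group_moves_for_execution_py_alt (campaign_moves : List (List (String × Int))) : List (List (List (String × Int))) :=
  ((PySem.List.sorted campaign_moves pvBucket false).foldl pvGroupStep ([], none)).1

-- ===== PRECONDITION & SPEC =====
def Spec_group_moves_for_execution_py (campaign_moves : List (List (String × Int))) (out : List (List (List (String × Int)))) : Prop := out = group_moves_for_execution_py_alt campaign_moves
instance (campaign_moves : List (List (String × Int))) (out : List (List (List (String × Int)))) : Decidable (Spec_group_moves_for_execution_py campaign_moves out) := by unfold Spec_group_moves_for_execution_py; infer_instance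

-- ===== CLAIM =====
def Claim_equal_group_moves_for_execution_py : Prop := ∀ (campaign_moves : List (List (String × Int))), Dom_group_moves_for_execution_py campaign_moves → Spec_group_moves_for_execution_py campaign_moves (group_moves_for_execution_py campaign_moves)

-- ===== LEMMAS AND PROOFS =====

theorem pv_insertBy_append {α : Type} (before : α → α → Bool) (x : α) (pre suf : List α)
    (h : ∀ y ∈ pre, before x y = false) :
    PySem.List.insertBy before x (pre ++ suf) = pre ++ PySem.List.insertBy before x suf := by
  induction pre with
  | nil => simp
  | cons p pre ih =>
    have hp : before x p = false := h p (by simp)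
    simp only [List.cons_append, PySem.List.insertBy, hp]
    simp only [Bool.false_eq_true, if_false]
    have := ih (fun y hy => h y (by simp [hy]))
    -- unfold the recursive call name back to insertBy
    exact congrArg (p :: ·) this

theorem pv_insertBy_all_before {α : Type} (before : α → α → Bool) (x : α) (ys : List α)
    (h : ∀ y ∈ ys, before x y = true) :
    PySem.List.insertBy before x ys = x :: ys := by
  cases ys with
  | nil => rfl
  | cons y t =>
    have := h y (by simp)
    simp [PySem.List.insertBy, this]

-- the three bucket filters
def pvF (k : Int) (xs : List (List (String × Int))) : List (List (String × Int)) :=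
  xs.filter (fun m => pvBucket m == k)

theorem pvBucket_mem_F {k : Int} {xs : List (List (String × Int))} {y : List (String × Int)}
    (h : y ∈ pvF k xs) : pvBucket y = k := by
  have := (List.mem_filter.1 h).2
  simpa using this

theorem pvBucket_cases (m : List (String × Int)) :
    pvBucket m = 0 ∨ pvBucket m = 1 ∨ pvBucket m = 2 := by
  unfold pvBucket; split_ifs <;> simp

-- the stable insertion sort by bucket is exactly the three filters concatenated
theorem pv_sorted_eq_filters (xs : List (List (String × Int))) :
    PySem.List.sorted xs pvBucket false = pvF 0 xs ++ pvF 1 xs ++ pvF 2 xs := by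
  rw [PySem.List.sorted_eq_foldl_insertBy]
  suffices H : ∀ (ys : List (List (String × Int))) (h m l : List (List (String × Int))),
      (∀ y ∈ h, pvBucket y = 0) → (∀ y ∈ m, pvBucket y = 1) → (∀ y ∈ l, pvBucket y = 2) →
      ys.foldl (fun acc x => PySem.List.insertBy (fun a b => decide (pvBucket a < pvBucket b)) x acc)
        (h ++ m ++ l) = (h ++ pvF 0 ys) ++ (m ++ pvF 1 ys) ++ (l ++ pvF 2 ys) by
    simpa using H xs [] [] [] (by simp) (by simp) (by simp)
  intro ys
  induction ys with
  | nil => intro h m l _ _ _; simp [pvF]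
  | cons x t ih =>
    intro h m l hh hm hl
    simp only [List.foldl_cons]
    rcases pvBucket_cases x with hb | hb | hb
    · have hstep :
          PySem.List.insertBy (fun a b => decide (pvBucket a < pvBucket b)) x (h ++ m ++ l)
            = (h ++ [x]) ++ m ++ l := by
        rw [List.append_assoc,
          pv_insertBy_append _ _ h (m ++ l) (fun y hy => by simp [hb, hh y hy]),
          pv_insertBy_all_before _ _ (m ++ l) (fun y hy => by
            rcases List.mem_append.1 hy with hy | hy
            · simp [hb, hm y hy]
            · simp [hb, hl y hy])]
        simp
      rw [hstep, ih (h ++ [x]) m l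
        (fun y hy => by rcases List.mem_append.1 hy with hy | hy
                        · exact hh y hy
                        · simp at hy; subst hy; exact hb) hm hl]
      simp [pvF, hb]
    · have hstep :
          PySem.List.insertBy (fun a b => decide (pvBucket a < pvBucket b)) x (h ++ m ++ l)
            = h ++ (m ++ [x]) ++ l := by
        rw [pv_insertBy_append _ _ (h ++ m) l (fun y hy => by
            rcases List.mem_append.1 hy with hy | hy
            · simp [hb, hh y hy]
            · simp [hb, hm y hy]),
          pv_insertBy_all_before _ _ l (fun y hy => by simp [hb, hl y hy])]
        simp
      rw [hstep, ih h (m ++ [x]) l hh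
        (fun y hy => by rcases List.mem_append.1 hy with hy | hy
                        · exact hm y hy
                        · simp at hy; subst hy; exact hb) hl]
      simp [pvF, hb]
    · have hstep :
          PySem.List.insertBy (fun a b => decide (pvBucket a < pvBucket b)) x (h ++ m ++ l)
            = h ++ m ++ (l ++ [x]) := by
        rw [PySem.List.insertBy_of_forall_not_before _ _ _ (fun y hy => by
            rcases List.mem_append.1 hy with hy | hy
            · rcases List.mem_append.1 hy with hy | hy
              · simp [hb, hh y hy]
              · simp [hb, hm y hy]
            · simp [hb, hl y hy])]
        simp
      rw [hstep, ih h m (l ++ [x]) hh hm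
        (fun y hy => by rcases List.mem_append.1 hy with hy | hy
                        · exact hl y hy
                        · simp at hy; subst hy; exact hb)]
      simp [pvF, hb]

theorem pvAppendLast_snoc (gs : List (List (List (String × Int)))) (g : List (List (String × Int)))
    (m : List (String × Int)) : pvAppendLast (gs ++ [g]) m = gs ++ [g ++ [m]] := by
  induction gs with
  | nil => rfl
  | cons a gs ih =>
    cases gs with
    | nil => rfl
    | cons b gs =>
      simp only [List.cons_append, pvAppendLast]
      rw [show b :: (gs ++ [g]) = (b :: gs) ++ [g] by simp, ih]
      simp

-- continuing a run: all of ys in the current bucket b extends the last group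
theorem pv_run_cont (ys : List (List (String × Int))) (b : Int)
    (hb : ∀ y ∈ ys, pvBucket y = b)
    (gs : List (List (List (String × Int)))) (g : List (List (String × Int))) :
    ys.foldl pvGroupStep (gs ++ [g], some b) = (gs ++ [g ++ ys], some b) := by
  induction ys generalizing g with
  | nil => simp
  | cons y t ih =>
    have hy : pvBucket y = b := hb y (by simp)
    simp only [List.foldl_cons, pvGroupStep, hy, reduceIte, pvAppendLast_snoc]
    rw [ih (fun z hz => hb z (by simp [hz])) (g ++ [y])]
    simp

-- a whole bucket run starting from a different last key
theorem pv_run (f : List (List (String × Int))) (k : Int)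
    (hk : ∀ y ∈ f, pvBucket y = k)
    (gs : List (List (List (String × Int)))) (last : Option Int) (hne : last ≠ some k) :
    f.foldl pvGroupStep (gs, last) =
      (gs ++ (if f.isEmpty then [] else [f]),
       if f.isEmpty then last else some k) := by
  cases f with
  | nil => simp
  | cons y t =>
    have hy : pvBucket y = k := hk y (by simp)
    simp only [List.foldl_cons, pvGroupStep, hy]
    rw [if_neg hne, pv_run_cont t k (fun z hz => hk z (by simp [hz])) gs [y]]
    simp

-- filters by bucket coincide with A's priority filters
theorem pvF0_eq (xs : List (List (String × Int))) :
    pvF 0 xs = xs.filter (fun m => decide (pvPriority m ≤ 2)) := by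
  apply List.filter_congr; intro m _
  unfold pvBucket; split_ifs <;> simp <;> omega
theorem pvF1_eq (xs : List (List (String × Int))) :
    pvF 1 xs = xs.filter (fun m => decide (2 < pvPriority m ∧ pvPriority m ≤ 4)) := by
  apply List.filter_congr; intro m _
  unfold pvBucket; split_ifs with h1 h2 <;> simp <;> omega
theorem pvF2_eq (xs : List (List (String × Int))) :
    pvF 2 xs = xs.filter (fun m => decide (4 < pvPriority m)) := by
  apply List.filter_congr; intro m _
  unfold pvBucket; split_ifs with h1 h2 <;> simp <;> omega

-- ===== VERDICT =====
theorem group_moves_for_execution_py_spec : Claim_equal_group_moves_for_execution_py := by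
  intro cm _
  unfold Spec_group_moves_for_execution_py group_moves_for_execution_py group_moves_for_execution_py_alt
  rw [pv_sorted_eq_filters, List.append_assoc, List.foldl_append, List.foldl_append]
  rw [pv_run (pvF 0 cm) 0 (fun y hy => pvBucket_mem_F hy) [] none (by simp)]
  rw [pv_run (pvF 1 cm) 1 (fun y hy => pvBucket_mem_F hy) _ _ (by split_ifs <;> simp)]
  rw [pv_run (pvF 2 cm) 2 (fun y hy => pvBucket_mem_F hy) _ _ (by split_ifs <;> simp)]
  simp only [pvF0_eq, pvF1_eq, pvF2_eq]
  split_ifs <;> simp
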